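-- pv_equiv track=rewrite | github.com/heehunjung/Coding-Test | python/프로그래머스/파괴되지_않은건물.py | solution
-- ===== SOURCE A (Python) =====
-- def solution(board, skill):
--     n = len(board)
--     m = len(board[0])
--     # 누적합을 위한 2차원 배열 초기화
--     delta = [[0] * (m + 1) for _ in range(n + 1)]
--
--     for current in skill:
--         t, r1, c1, r2, c2, degree = current
--         if t == 1:  # 공격 스킬
--             degree *= -1
--
--         # 차분 배열에 스킬 적용
--         delta[r1][c1] += degree
--         delta[r1][c2 + 1] -= degree
--         delta[r2 + 1][c1] -= degree
--         delta[r2 + 1][c2 + 1] += degree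
--
--     # 누적합을 통해 최종 보드 상태 계산
--     for i in range(n):
--         for j in range(m):
--             delta[i][j + 1] += delta[i][j]
--
--     for j in range(m):
--         for i in range(n):
--             delta[i + 1][j] += delta[i][j]
--
--     # 최종 보드에 차분 값을 더함
--     for i in range(n):
--         for j in range(m):
--             board[i][j] += delta[i][j]
--
--     # 0보다 큰 값의 개수 세기
--     answer = sum(1 for row in board for value in row if value > 0)
--
--     return answer
-- ===== SOURCE B (Python) =====
-- def solution(board, skill):
--     # Per-cell evaluation: for each cell, sum the contributions of all skills
--     # whose rectangle covers it, then count positives.  Reads board only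
--     # (A mutates board in place; the equivalence is about the return value).
--     deltas = [(-deg if t == 1 else deg, r1, c1, r2, c2)
--               for t, r1, c1, r2, c2, deg in skill]
--     answer = 0
--     for i, row in enumerate(board):
--         for j, v in enumerate(row):
--             total = v
--             for d, r1, c1, r2, c2 in deltas:
--                 if r1 <= i <= r2 and c1 <= j <= c2:
--                     total += d
--             if total > 0:
--                 answer += 1
--     return answer
-- ===== Notes on version B (the rewrite author's own statement) =====
-- stated objective: simpler
-- what changed: Replaces the 2-D difference array plus two prefix-sum passes and an in-place board update by a direct per-cell scan that sums, for each cell, the signed degrees of the skills whose rectangle covers it, and counts positives on the fly (no auxiliary matrix, no mutation).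
-- outside the precondition, e.g. on solution([[1], [-1]], [[0, 2, 0, 0, 0, -5]]): A returns 2, B returns 1; on solution([[1]], [[0, -1, 0, -1, 0, 5]]): A returns 0, B returns 1
import Mathlib
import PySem

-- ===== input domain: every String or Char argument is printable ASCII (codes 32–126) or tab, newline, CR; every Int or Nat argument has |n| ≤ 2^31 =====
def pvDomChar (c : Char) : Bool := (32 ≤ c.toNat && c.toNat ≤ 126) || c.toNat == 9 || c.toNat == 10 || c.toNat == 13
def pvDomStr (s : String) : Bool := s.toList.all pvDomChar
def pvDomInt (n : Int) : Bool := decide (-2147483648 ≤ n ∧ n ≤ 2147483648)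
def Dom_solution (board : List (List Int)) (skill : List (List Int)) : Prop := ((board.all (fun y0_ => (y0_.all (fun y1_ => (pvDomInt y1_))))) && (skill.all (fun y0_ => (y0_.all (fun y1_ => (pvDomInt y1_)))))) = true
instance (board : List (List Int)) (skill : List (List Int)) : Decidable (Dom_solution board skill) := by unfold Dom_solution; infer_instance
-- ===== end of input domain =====

-- B replaces A's 2-D difference array + two prefix-sum passes + in-place board update by a
-- direct per-cell sum of covering skills (simpler; reads board only — A mutates board in place,
-- the equivalence proved is about the return value).

-- ===== PORT A =====
-- matrix cell read: delta[i][j]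
def mget (M : List (List Int)) (i j : Nat) : Int := (M.getD i []).getD j 0

-- matrix cell update: delta[i][j] += d (caller guarantees in-range)
def madd (M : List (List Int)) (i j : Nat) (d : Int) : List (List Int) :=
  M.set i ((M.getD i []).set j (mget M i j + d))

-- Python 'M[i][j] += d' with int indices: negative indices wrap by the length,
-- out-of-range is IndexError (excluded by Pre_; the port leaves M unchanged there).
def addAt (M : List (List Int)) (i j d : Int) : List (List Int) :=
  let i' := if i < 0 then i + M.length else i
  if 0 ≤ i' ∧ i' < (M.length : Int) then
    let row := M.getD i'.toNat []
    let j' := if j < 0 then j + row.length else j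
    if 0 ≤ j' ∧ j' < (row.length : Int) then madd M i'.toNat j'.toNat d else M
  else M

-- body of A's first loop: unpack one skill and stamp the four difference-array corners
def applySkill (M : List (List Int)) (s : List Int) : List (List Int) :=
  match s with
  | [t, r1, c1, r2, c2, degree0] =>
    let degree := if t == 1 then -degree0 else degree0
    addAt (addAt (addAt (addAt M r1 c1 degree) r1 (c2 + 1) (-degree)) (r2 + 1) c1 (-degree)) (r2 + 1) (c2 + 1) degree
  | _ => M   -- Python raises ValueError on unpacking; excluded by Pre_

-- for i in range(n): for j in range(m): delta[i][j+1] += delta[i][j]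
def rowPass (n m : Nat) (M : List (List Int)) : List (List Int) :=
  (List.range n).foldl (fun M i => (List.range m).foldl (fun M j => madd M i (j + 1) (mget M i j)) M) M

-- for j in range(m): for i in range(n): delta[i+1][j] += delta[i][j]
def colPass (n m : Nat) (M : List (List Int)) : List (List Int) :=
  (List.range m).foldl (fun M j => (List.range n).foldl (fun M i => madd M (i + 1) j (mget M i j)) M) M

-- for i in range(n): for j in range(m): board[i][j] += delta[i][j]
def addPass (n m : Nat) (D B : List (List Int)) : List (List Int) :=
  (List.range n).foldl (fun B i => (List.range m).foldl (fun B j => madd B i j (mget D i j)) B) B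

-- sum(1 for row in board for value in row if value > 0)
def countPos (B : List (List Int)) : Int :=
  B.foldl (fun acc row => row.foldl (fun a v => if v > 0 then a + 1 else a) acc) 0

def solution (board : List (List Int)) (skill : List (List Int)) : Int :=
  let n := board.length
  let m := (board.headD []).length   -- board[0]: IndexError on empty board, excluded by Pre_
  let delta0 := List.replicate (n + 1) (List.replicate (m + 1) (0 : Int))
  let d1 := skill.foldl applySkill delta0
  let d3 := colPass n m (rowPass n m d1)
  countPos (addPass n m d3 board)

-- ===== PORT B =====
-- the tuple (-deg if t == 1 else deg, r1, c1, r2, c2) of B's comprehension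
def skillDelta (s : List Int) : Int × Int × Int × Int × Int :=
  match s with
  | [t, r1, c1, r2, c2, deg] => ((if t == 1 then -deg else deg), r1, c1, r2, c2)
  | _ => (0, 0, 0, 0, 0)   -- Python raises ValueError on unpacking; excluded by Pre_

def solution_alt (board : List (List Int)) (skill : List (List Int)) : Int :=
  let deltas := skill.map skillDelta
  (PySem.List.enumerate board).foldl (fun answer p =>
    (PySem.List.enumerate p.2).foldl (fun answer q =>
      let total : Int := deltas.foldl (fun t e =>
        if e.2.1 ≤ p.1 ∧ p.1 ≤ e.2.2.2.1 ∧ e.2.2.1 ≤ q.1 ∧ q.1 ≤ e.2.2.2.2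
        then t + e.1 else t) q.2
      if total > 0 then answer + 1 else answer) answer) 0

-- ===== PRECONDITION & SPEC =====
-- Pre_ excludes: the empty board and rows shorter than row 0 (A raises IndexError),
-- skill rows not of length 6 (A raises ValueError), and skills whose coordinates are
-- negative, out of range or unordered (r1 > r2 / c1 > c2) — there A either raises or
-- returns a value produced by negative-index wraparound / an inverted difference
-- rectangle, an accident of A's difference-array implementation.
def Pre_solution (board : List (List Int)) (skill : List (List Int)) : Prop :=
  board ≠ [] ∧
  (∀ row ∈ board, (board.headD []).length ≤ row.length) ∧
  (∀ s ∈ skill, s.length = 6 ∧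
    0 ≤ s.getD 1 0 ∧ s.getD 1 0 ≤ s.getD 3 0 ∧ s.getD 3 0 < (board.length : Int) ∧
    0 ≤ s.getD 2 0 ∧ s.getD 2 0 ≤ s.getD 4 0 ∧ s.getD 4 0 < ((board.headD []).length : Int))
instance (board : List (List Int)) (skill : List (List Int)) : Decidable (Pre_solution board skill) := by
  unfold Pre_solution; infer_instance

def pvWitness_solution : List (List Int) × List (List Int) :=
  ([[1, -2], [0, 3]], [[1, 0, 0, 1, 1, 2], [2, 0, 1, 0, 1, 4]])

def Spec_solution (board : List (List Int)) (skill : List (List Int)) (out : Int) : Prop := out = solution_alt board skill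
instance (board : List (List Int)) (skill : List (List Int)) (out : Int) : Decidable (Spec_solution board skill out) := by unfold Spec_solution; infer_instance

-- ===== CLAIM (what is proved, stated in full; the proofs are below) =====
def Claim_equal_solution : Prop := ∀ (board : List (List Int)) (skill : List (List Int)), Dom_solution board skill → Pre_solution board skill → Spec_solution board skill (solution board skill)

-- ===== LEMMAS AND PROOFS =====

-- row/column shape of a matrix
def Shape (M : List (List Int)) (n m : Nat) : Prop :=
  M.length = n ∧ ∀ i, i < n → (M.getD i []).length = m

-- the four signed point masses a skill stamps into the difference array
def pts (s : List Int) (a b : Nat) : Int :=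
  match s with
  | [t, r1, c1, r2, c2, deg0] =>
    let d := if t == 1 then -deg0 else deg0
    (if (a : Int) = r1 ∧ (b : Int) = c1 then d else 0)
    - (if (a : Int) = r1 ∧ (b : Int) = c2 + 1 then d else 0)
    - (if (a : Int) = r2 + 1 ∧ (b : Int) = c1 then d else 0)
    + (if (a : Int) = r2 + 1 ∧ (b : Int) = c2 + 1 then d else 0)
  | _ => 0

-- contribution of one skill to one cell
def eff (s : List Int) (i j : Int) : Int :=
  if s.getD 1 0 ≤ i ∧ i ≤ s.getD 3 0 ∧ s.getD 2 0 ≤ j ∧ j ≤ s.getD 4 0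
  then (if s.getD 0 0 == 1 then -(s.getD 5 0) else s.getD 5 0) else 0

def effSum (skill : List (List Int)) (i j : Int) : Int :=
  (skill.map (fun s => eff s i j)).sum

def SkOK (n m : Nat) (s : List Int) : Prop :=
  s.length = 6 ∧
  0 ≤ s.getD 1 0 ∧ s.getD 1 0 ≤ s.getD 3 0 ∧ s.getD 3 0 < (n : Int) ∧
  0 ≤ s.getD 2 0 ∧ s.getD 2 0 ≤ s.getD 4 0 ∧ s.getD 4 0 < (m : Int)

theorem getD_set {α : Type} (l : List α) (i i' : Nat) (r : α) (dflt : α) :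
    (l.set i r).getD i' dflt = if i = i' ∧ i < l.length then r else l.getD i' dflt := by
  rcases eq_or_ne i i' with rfl | hne
  · by_cases h : i < l.length
    · simp [List.getD_eq_getElem?_getD, h]
    · simp [List.getD_eq_getElem?_getD, h]
  · simp [List.getD_eq_getElem?_getD, List.getElem?_set_ne hne, hne]

theorem length_madd (M : List (List Int)) (i j : Nat) (d : Int) :
    (madd M i j d).length = M.length := by
  simp [madd]

theorem rowlen_madd (M : List (List Int)) (i j : Nat) (d : Int) (a : Nat) :
    ((madd M i j d).getD a []).length = (M.getD a []).length := by
  rw [madd, getD_set]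
  split_ifs with h
  · rw [← h.1]; simp
  · rfl

theorem shape_madd {M : List (List Int)} {n m : Nat} (h : Shape M n m) (i j : Nat) (d : Int) :
    Shape (madd M i j d) n m := by
  refine ⟨by rw [length_madd]; exact h.1, fun a ha => by rw [rowlen_madd]; exact h.2 a ha⟩

theorem mget_madd {M : List (List Int)} {i j : Nat} (hi : i < M.length)
    (hj : j < (M.getD i []).length) (d : Int) (a b : Nat) :
    mget (madd M i j d) a b = mget M a b + if a = i ∧ b = j then d else 0 := by
  rw [mget, madd, getD_set]
  rcases eq_or_ne a i with rfl | hne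
  · rw [if_pos ⟨rfl, hi⟩, getD_set]
    rcases eq_or_ne b j with rfl | hbe
    · rw [if_pos ⟨rfl, hj⟩]
      simp
    · rw [if_neg (by exact fun h => hbe (h.1.symm))]
      simp [mget, hbe]
  · rw [if_neg (by exact fun h => hne (h.1.symm))]
    simp [mget, hne]

theorem shape_replicate (n m : Nat) :
    Shape (List.replicate (n + 1) (List.replicate (m + 1) (0 : Int))) (n + 1) (m + 1) := by
  refine ⟨by simp, fun i hi => ?_⟩
  rw [List.getD_eq_getElem?_getD, List.getElem?_replicate, if_pos hi]
  simp

theorem mget_replicate (n m a b : Nat) :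
    mget (List.replicate (n + 1) (List.replicate (m + 1) (0 : Int))) a b = 0 := by
  rw [mget]
  by_cases h : a < n + 1 <;> by_cases h2 : b < m + 1 <;>
    simp [List.getD_eq_getElem?_getD, h, h2]

theorem addAt_eq_madd {M : List (List Int)} {i j : Int} (d : Int)
    (hi0 : 0 ≤ i) (hi : i < (M.length : Int)) (hj0 : 0 ≤ j)
    (hj : j < ((M.getD i.toNat []).length : Int)) :
    addAt M i j d = madd M i.toNat j.toNat d := by
  rw [addAt]
  have h1 : ¬ i < 0 := by omega
  have h2 : ¬ j < 0 := by omega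
  simp only [h1, h2, if_false]
  rw [if_pos ⟨hi0, hi⟩, if_pos ⟨hj0, hj⟩]

theorem neg_ite_zero (C : Prop) [Decidable C] (d : Int) :
    (if C then -d else 0) = -(if C then d else 0) := by
  split_ifs <;> ring

theorem applySkill_mget {n m : Nat} {s : List Int} {M : List (List Int)}
    (h : SkOK n m s) (hS : Shape M (n + 1) (m + 1)) :
    Shape (applySkill M s) (n + 1) (m + 1) ∧
      ∀ a b, mget (applySkill M s) a b = mget M a b + pts s a b := by
  obtain ⟨hlen, h1, h2, h3, h4, h5, h6⟩ := h
  rcases s with _ | ⟨t, _ | ⟨r1, _ | ⟨c1, _ | ⟨r2, _ | ⟨c2, _ | ⟨deg, rest⟩⟩⟩⟩⟩⟩ <;>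
    simp at hlen
  obtain rfl : rest = [] := by
    cases rest with
    | nil => rfl
    | cons x xs => simp at hlen
  simp only [List.getD_cons_succ, List.getD_cons_zero] at h1 h2 h3 h4 h5 h6
  have step : ∀ (N : List (List Int)) (i j dd : Int), Shape N (n + 1) (m + 1) →
      0 ≤ i → i < (n : Int) + 1 → 0 ≤ j → j < (m : Int) + 1 →
      Shape (addAt N i j dd) (n + 1) (m + 1) ∧
        ∀ a b, mget (addAt N i j dd) a b
          = mget N a b + if (a : Int) = i ∧ (b : Int) = j then dd else 0 := by
    intro N i j dd hSN hi0 hi hj0 hj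
    have hiN : i < (N.length : Int) := by rw [hSN.1]; push_cast; omega
    have hrl : (N.getD i.toNat []).length = m + 1 := hSN.2 i.toNat (by omega)
    have hjN : j < ((N.getD i.toNat []).length : Int) := by rw [hrl]; push_cast; omega
    rw [addAt_eq_madd dd hi0 hiN hj0 hjN]
    refine ⟨shape_madd hSN _ _ _, fun a b => ?_⟩
    rw [mget_madd (by rw [hSN.1]; omega) (by rw [hrl]; omega) dd a b]
    congr 1
    exact if_congr (by omega) rfl rfl
  simp only [applySkill]
  obtain ⟨S1, E1⟩ := step M r1 c1 (if t == 1 then -deg else deg) hS h1 (by omega) h4 (by omega)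
  obtain ⟨S2, E2⟩ := step _ r1 (c2 + 1) (-(if t == 1 then -deg else deg)) S1 h1 (by omega) (by omega) (by omega)
  obtain ⟨S3, E3⟩ := step _ (r2 + 1) c1 (-(if t == 1 then -deg else deg)) S2 (by omega) (by omega) h4 (by omega)
  obtain ⟨S4, E4⟩ := step _ (r2 + 1) (c2 + 1) (if t == 1 then -deg else deg) S3 (by omega) (by omega) (by omega) (by omega)
  refine ⟨S4, fun a b => ?_⟩
  rw [E4, E3, E2, E1]
  simp only [pts, neg_ite_zero]
  ring

theorem fold1_mget {n m : Nat} (skill : List (List Int)) :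
    ∀ (M : List (List Int)), Shape M (n + 1) (m + 1) → (∀ s ∈ skill, SkOK n m s) →
      Shape (skill.foldl applySkill M) (n + 1) (m + 1) ∧
      ∀ a b, mget (skill.foldl applySkill M) a b
        = mget M a b + (skill.map (fun s => pts s a b)).sum := by
  induction skill with
  | nil => intro M hS _; exact ⟨hS, by simp⟩
  | cons s rest ih =>
    intro M hS hsk
    obtain ⟨S1, E1⟩ := applySkill_mget (hsk s (List.mem_cons_self)) hS
    obtain ⟨S2, E2⟩ := ih (applySkill M s) S1 (fun s' hs' => hsk s' (List.mem_cons_of_mem _ hs'))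
    refine ⟨S2, fun a b => ?_⟩
    rw [List.foldl_cons, E2, E1]
    simp only [List.map_cons, List.sum_cons]
    ring

-- one row of the first prefix pass
theorem rowstep {i m : Nat} {M : List (List Int)} (hi : i < M.length)
    (hm : m < (M.getD i []).length) :
    ∀ k, k ≤ m →
      ((List.range k).foldl (fun M j => madd M i (j + 1) (mget M i j)) M).length = M.length ∧
      (∀ a, (((List.range k).foldl (fun M j => madd M i (j + 1) (mget M i j)) M).getD a []).length
          = (M.getD a []).length) ∧
      ∀ a b, mget ((List.range k).foldl (fun M j => madd M i (j + 1) (mget M i j)) M) a b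
        = if a = i ∧ b ≤ k then ∑ x ∈ Finset.range (b + 1), mget M i x else mget M a b := by
  intro k
  induction k with
  | zero =>
    intro _
    refine ⟨rfl, fun a => rfl, fun a b => ?_⟩
    simp only [List.range_zero, List.foldl_nil]
    split_ifs with h
    · obtain ⟨rfl, hb⟩ := h
      obtain rfl : b = 0 := by omega
      rw [Finset.sum_range_one]
    · rfl
  | succ k ih =>
    intro hk1
    obtain ⟨L, R, E⟩ := ih (by omega)
    have hfold : (List.range (k + 1)).foldl (fun M j => madd M i (j + 1) (mget M i j)) M
        = madd ((List.range k).foldl (fun M j => madd M i (j + 1) (mget M i j)) M) i (k + 1)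
            (mget ((List.range k).foldl (fun M j => madd M i (j + 1) (mget M i j)) M) i k) := by
      rw [List.range_succ, List.foldl_append, List.foldl_cons, List.foldl_nil]
    have hiG : i < ((List.range k).foldl (fun M j => madd M i (j + 1) (mget M i j)) M).length := by
      rw [L]; exact hi
    have hk2 : k + 1 < (((List.range k).foldl (fun M j => madd M i (j + 1) (mget M i j)) M).getD i []).length := by
      rw [R]; omega
    refine ⟨by rw [hfold, length_madd, L], fun a => by rw [hfold, rowlen_madd, R], fun a b => ?_⟩
    rw [hfold, mget_madd hiG hk2, E a b, E i k,
      if_pos (show i = i ∧ k ≤ k from ⟨rfl, le_rfl⟩)]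
    by_cases hai : a = i
    · subst hai
      by_cases hb : b = k + 1
      · subst hb
        rw [if_neg (by omega), if_pos ⟨rfl, rfl⟩, if_pos ⟨rfl, by omega⟩,
          Finset.sum_range_succ (fun x => mget M a x) (k + 1)]
        ring
      · by_cases hbk : b ≤ k
        · rw [if_pos ⟨rfl, hbk⟩, if_neg (fun h => hb h.2), if_pos ⟨rfl, by omega⟩]
          ring
        · rw [if_neg (by omega), if_neg (fun h => hb h.2), if_neg (by omega)]
          ring
    · rw [if_neg (fun h => hai h.1), if_neg (fun h => hai h.1), if_neg (fun h => hai h.1)]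
      ring

theorem rowPass_aux {n m : Nat} {M : List (List Int)} (hS : Shape M (n + 1) (m + 1)) :
    ∀ k, k ≤ n →
      Shape ((List.range k).foldl (fun M i => (List.range m).foldl (fun M j => madd M i (j + 1) (mget M i j)) M) M) (n + 1) (m + 1) ∧
      ∀ a b, mget ((List.range k).foldl (fun M i => (List.range m).foldl (fun M j => madd M i (j + 1) (mget M i j)) M) M) a b
        = if a < k ∧ b ≤ m then ∑ x ∈ Finset.range (b + 1), mget M a x else mget M a b := by
  intro k
  induction k with
  | zero =>
    intro _
    refine ⟨hS, fun a b => ?_⟩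
    simp
  | succ k ih =>
    intro hk1
    obtain ⟨Sk, E⟩ := ih (by omega)
    set G := (List.range k).foldl (fun M i => (List.range m).foldl (fun M j => madd M i (j + 1) (mget M i j)) M) M with hG
    have hfold : (List.range (k + 1)).foldl (fun M i => (List.range m).foldl (fun M j => madd M i (j + 1) (mget M i j)) M) M
        = (List.range m).foldl (fun M j => madd M k (j + 1) (mget M k j)) G := by
      rw [List.range_succ, List.foldl_append, List.foldl_cons, List.foldl_nil]
    have hkG : k < G.length := by rw [Sk.1]; omega
    have hmG : m < (G.getD k []).length := by rw [Sk.2 k (by omega)]; omega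
    obtain ⟨L, R, E2⟩ := rowstep hkG hmG m le_rfl
    rw [hfold]
    refine ⟨⟨by rw [L, Sk.1], fun a ha => by rw [R, Sk.2 a ha]⟩, fun a b => ?_⟩
    rw [E2 a b]
    by_cases hak : a = k
    · subst hak
      by_cases hbm : b ≤ m
      · rw [if_pos ⟨rfl, hbm⟩, if_pos ⟨by omega, hbm⟩,
          Finset.sum_congr rfl (fun x hx => by rw [E a x, if_neg (by omega)])]
      · rw [if_neg (by omega), if_neg (by omega), E a b, if_neg (by omega)]
    · rw [if_neg (fun h => hak h.1), E a b]
      exact if_congr (by omega) rfl rfl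

theorem rowPass_mget {n m : Nat} {M : List (List Int)} (hS : Shape M (n + 1) (m + 1)) :
    Shape (rowPass n m M) (n + 1) (m + 1) ∧
    ∀ a b, mget (rowPass n m M) a b
      = if a < n ∧ b ≤ m then ∑ x ∈ Finset.range (b + 1), mget M a x else mget M a b := by
  exact rowPass_aux hS n le_rfl

theorem colstep {j n m : Nat} {M : List (List Int)} (hS : Shape M (n + 1) (m + 1)) (hj : j < m) :
    ∀ k, k ≤ n →
      Shape ((List.range k).foldl (fun M i => madd M (i + 1) j (mget M i j)) M) (n + 1) (m + 1) ∧
      ∀ a b, mget ((List.range k).foldl (fun M i => madd M (i + 1) j (mget M i j)) M) a b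
        = if b = j ∧ a ≤ k then ∑ x ∈ Finset.range (a + 1), mget M x j else mget M a b := by
  intro k
  induction k with
  | zero =>
    intro _
    refine ⟨hS, fun a b => ?_⟩
    simp only [List.range_zero, List.foldl_nil]
    split_ifs with h
    · obtain ⟨rfl, ha⟩ := h
      obtain rfl : a = 0 := by omega
      rw [Finset.sum_range_one]
    · rfl
  | succ k ih =>
    intro hk1
    obtain ⟨Sk, E⟩ := ih (by omega)
    set G := (List.range k).foldl (fun M i => madd M (i + 1) j (mget M i j)) M with hG
    have hfold : (List.range (k + 1)).foldl (fun M i => madd M (i + 1) j (mget M i j)) M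
        = madd G (k + 1) j (mget G k j) := by
      rw [List.range_succ, List.foldl_append, List.foldl_cons, List.foldl_nil]
    have hkG : k + 1 < G.length := by rw [Sk.1]; omega
    have hjG : j < (G.getD (k + 1) []).length := by rw [Sk.2 (k + 1) (by omega)]; omega
    rw [hfold]
    refine ⟨shape_madd Sk _ _ _, fun a b => ?_⟩
    rw [mget_madd hkG hjG, E a b, E k j, if_pos (show j = j ∧ k ≤ k from ⟨rfl, le_rfl⟩)]
    by_cases hbj : b = j
    · subst hbj
      by_cases hak : a = k + 1
      · subst hak
        rw [if_neg (by omega), if_pos ⟨rfl, rfl⟩, if_pos ⟨rfl, by omega⟩,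
          Finset.sum_range_succ (fun x => mget M x b) (k + 1)]
        ring
      · by_cases hka : a ≤ k
        · rw [if_pos ⟨rfl, hka⟩, if_neg (fun h => hak h.1), if_pos ⟨rfl, by omega⟩]
          ring
        · rw [if_neg (by omega), if_neg (fun h => hak h.1), if_neg (by omega)]
          ring
    · rw [if_neg (fun h => hbj h.1), if_neg (fun h => hbj h.2), if_neg (fun h => hbj h.1)]
      ring

theorem colPass_aux {n m : Nat} {M : List (List Int)} (hS : Shape M (n + 1) (m + 1)) :
    ∀ k, k ≤ m →
      Shape ((List.range k).foldl (fun M j => (List.range n).foldl (fun M i => madd M (i + 1) j (mget M i j)) M) M) (n + 1) (m + 1) ∧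
      ∀ a b, mget ((List.range k).foldl (fun M j => (List.range n).foldl (fun M i => madd M (i + 1) j (mget M i j)) M) M) a b
        = if b < k ∧ a ≤ n then ∑ x ∈ Finset.range (a + 1), mget M x b else mget M a b := by
  intro k
  induction k with
  | zero =>
    intro _
    refine ⟨hS, fun a b => ?_⟩
    simp
  | succ k ih =>
    intro hk1
    obtain ⟨Sk, E⟩ := ih (by omega)
    set G := (List.range k).foldl (fun M j => (List.range n).foldl (fun M i => madd M (i + 1) j (mget M i j)) M) M with hG
    have hfold : (List.range (k + 1)).foldl (fun M j => (List.range n).foldl (fun M i => madd M (i + 1) j (mget M i j)) M) M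
        = (List.range n).foldl (fun M i => madd M (i + 1) k (mget M i k)) G := by
      rw [List.range_succ, List.foldl_append, List.foldl_cons, List.foldl_nil]
    obtain ⟨Sk1, E2⟩ := colstep Sk (show k < m by omega) n le_rfl
    rw [hfold]
    refine ⟨Sk1, fun a b => ?_⟩
    rw [E2 a b]
    by_cases hbk : b = k
    · subst hbk
      by_cases han : a ≤ n
      · rw [if_pos ⟨rfl, han⟩, if_pos ⟨by omega, han⟩,
          Finset.sum_congr rfl (fun x hx => by rw [E x b, if_neg (by omega)])]
      · rw [if_neg (by omega), if_neg (by omega), E a b, if_neg (by omega)]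
    · rw [if_neg (fun h => hbk h.1), E a b]
      exact if_congr (by omega) rfl rfl

theorem colPass_mget {n m : Nat} {M : List (List Int)} (hS : Shape M (n + 1) (m + 1)) :
    Shape (colPass n m M) (n + 1) (m + 1) ∧
    ∀ a b, mget (colPass n m M) a b
      = if b < m ∧ a ≤ n then ∑ x ∈ Finset.range (a + 1), mget M x b else mget M a b := by
  exact colPass_aux hS m le_rfl

-- one row of the board-update pass
theorem addrowstep {i m : Nat} {D B : List (List Int)} (hi : i < B.length)
    (hm : m ≤ (B.getD i []).length) :
    ∀ k, k ≤ m →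
      ((List.range k).foldl (fun B j => madd B i j (mget D i j)) B).length = B.length ∧
      (∀ a, (((List.range k).foldl (fun B j => madd B i j (mget D i j)) B).getD a []).length
          = (B.getD a []).length) ∧
      ∀ a b, mget ((List.range k).foldl (fun B j => madd B i j (mget D i j)) B) a b
        = mget B a b + if a = i ∧ b < k then mget D i b else 0 := by
  intro k
  induction k with
  | zero =>
    intro _
    exact ⟨rfl, fun a => rfl, fun a b => by simp⟩
  | succ k ih =>
    intro hk1
    obtain ⟨L, R, E⟩ := ih (by omega)
    set G := (List.range k).foldl (fun B j => madd B i j (mget D i j)) B with hG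
    have hfold : (List.range (k + 1)).foldl (fun B j => madd B i j (mget D i j)) B
        = madd G i k (mget D i k) := by
      rw [List.range_succ, List.foldl_append, List.foldl_cons, List.foldl_nil]
    have hiG : i < G.length := by rw [L]; exact hi
    have hkG : k < (G.getD i []).length := by rw [R]; omega
    rw [hfold]
    refine ⟨by rw [length_madd, L], fun a => by rw [rowlen_madd, R], fun a b => ?_⟩
    rw [mget_madd hiG hkG, E a b]
    by_cases hai : a = i
    · subst hai
      by_cases hbk : b = k
      · subst hbk
        rw [if_neg (by omega), if_pos ⟨rfl, rfl⟩, if_pos ⟨rfl, by omega⟩]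
        ring
      · by_cases hb : b < k
        · rw [if_pos ⟨rfl, hb⟩, if_neg (fun h => hbk h.2), if_pos ⟨rfl, by omega⟩]
          ring
        · rw [if_neg (by omega), if_neg (fun h => hbk h.2), if_neg (by omega)]
          ring
    · rw [if_neg (fun h => hai h.1), if_neg (fun h => hai h.1), if_neg (fun h => hai h.1)]
      ring

theorem addPass_mget {n m : Nat} {D B : List (List Int)} (hn : n = B.length)
    (hrows : ∀ i, i < n → m ≤ (B.getD i []).length) :
    (addPass n m D B).length = B.length ∧
    (∀ a, ((addPass n m D B).getD a []).length = (B.getD a []).length) ∧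
    ∀ a b, mget (addPass n m D B) a b
      = mget B a b + if a < n ∧ b < m then mget D a b else 0 := by
  suffices h : ∀ k, k ≤ n →
      ((List.range k).foldl (fun B i => (List.range m).foldl (fun B j => madd B i j (mget D i j)) B) B).length = B.length ∧
      (∀ a, (((List.range k).foldl (fun B i => (List.range m).foldl (fun B j => madd B i j (mget D i j)) B) B).getD a []).length
          = (B.getD a []).length) ∧
      ∀ a b, mget ((List.range k).foldl (fun B i => (List.range m).foldl (fun B j => madd B i j (mget D i j)) B) B) a b
        = mget B a b + if a < k ∧ b < m then mget D a b else 0 by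
    exact h n le_rfl
  intro k
  induction k with
  | zero =>
    intro _
    exact ⟨rfl, fun a => rfl, fun a b => by simp⟩
  | succ k ih =>
    intro hk1
    obtain ⟨L, R, E⟩ := ih (by omega)
    set G := (List.range k).foldl (fun B i => (List.range m).foldl (fun B j => madd B i j (mget D i j)) B) B with hG
    have hfold : (List.range (k + 1)).foldl (fun B i => (List.range m).foldl (fun B j => madd B i j (mget D i j)) B) B
        = (List.range m).foldl (fun B j => madd B k j (mget D k j)) G := by
      rw [List.range_succ, List.foldl_append, List.foldl_cons, List.foldl_nil]
    have hkG : k < G.length := by rw [L]; omega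
    have hmG : m ≤ (G.getD k []).length := by rw [R]; exact hrows k (by omega)
    obtain ⟨L2, R2, E2⟩ := addrowstep hkG hmG m le_rfl
    rw [hfold]
    refine ⟨by rw [L2, L], fun a => by rw [R2, R], fun a b => ?_⟩
    rw [E2 a b, E a b]
    by_cases hak : a = k
    · subst hak
      by_cases hbm : b < m
      · rw [if_neg (by omega), if_pos ⟨rfl, hbm⟩, if_pos ⟨by omega, hbm⟩]
        ring
      · rw [if_neg (by omega), if_neg (fun h => hbm h.2), if_neg (fun h => hbm h.2)]
        ring
    · rw [if_neg (show ¬(a = k ∧ b < m) from fun h => hak h.1)]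
      have : (a < k ∧ b < m) ↔ (a < k + 1 ∧ b < m) := by omega
      rw [if_congr this rfl rfl]
      ring

theorem rowcount (row : List Int) :
    ∀ acc : Int, row.foldl (fun a v => if v > 0 then a + 1 else a) acc
      = acc + ∑ b ∈ Finset.range row.length, (if 0 < row.getD b 0 then (1 : Int) else 0) := by
  induction row with
  | nil => intro acc; simp
  | cons x xs ih =>
    intro acc
    rw [List.foldl_cons, ih, List.length_cons, Finset.sum_range_succ']
    simp only [List.getD_cons_succ, List.getD_cons_zero]
    split_ifs with h <;> ring

theorem countPos_aux (B : List (List Int)) :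
    ∀ acc : Int, B.foldl (fun acc row => row.foldl (fun a v => if v > 0 then a + 1 else a) acc) acc
      = acc + ∑ a ∈ Finset.range B.length,
          ∑ b ∈ Finset.range ((B.getD a []).length), (if 0 < mget B a b then (1 : Int) else 0) := by
  induction B with
  | nil => intro acc; simp
  | cons r rs ih =>
    intro acc
    rw [List.foldl_cons, ih, rowcount, List.length_cons, Finset.sum_range_succ']
    simp only [mget, List.getD_cons_succ, List.getD_cons_zero]
    ring

theorem countPos_eq (B : List (List Int)) :
    countPos B = ∑ a ∈ Finset.range B.length,
      ∑ b ∈ Finset.range ((B.getD a []).length), (if 0 < mget B a b then (1 : Int) else 0) := by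
  rw [countPos, countPos_aux]
  ring

-- B side: the innermost fold over the skills computes v + effSum
theorem total_eq (skill : List (List Int)) (hsk : ∀ s ∈ skill, s.length = 6) (i j : Int) :
    ∀ v : Int, (skill.map skillDelta).foldl (fun t e =>
        if e.2.1 ≤ i ∧ i ≤ e.2.2.2.1 ∧ e.2.2.1 ≤ j ∧ j ≤ e.2.2.2.2 then t + e.1 else t) v
      = v + effSum skill i j := by
  revert hsk
  induction skill with
  | nil => intro _ v; simp [effSum]
  | cons s rest ih =>
    intro hsk v
    have h6 := hsk s List.mem_cons_self
    rcases s with _ | ⟨t, _ | ⟨r1, _ | ⟨c1, _ | ⟨r2, _ | ⟨c2, _ | ⟨deg, rest'⟩⟩⟩⟩⟩⟩ <;>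
      simp at h6
    obtain rfl : rest' = [] := by
      cases rest' with
      | nil => rfl
      | cons x xs => simp at h6
    rw [List.map_cons, List.foldl_cons, ih (fun s' hs' => hsk s' (List.mem_cons_of_mem _ hs'))]
    have : effSum ([t, r1, c1, r2, c2, deg] :: rest) i j
        = eff [t, r1, c1, r2, c2, deg] i j + effSum rest i j := by
      simp [effSum]
    rw [this]
    simp only [skillDelta, eff, List.getD_cons_succ, List.getD_cons_zero]
    split_ifs with h <;> ring

theorem brow (skill : List (List Int)) (hsk : ∀ s ∈ skill, s.length = 6) (i : Int) (row : List Int) :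
    ∀ (s acc : Int), (PySem.List.enumerate row s).foldl (fun answer q =>
        if (skill.map skillDelta).foldl (fun t e =>
            if e.2.1 ≤ i ∧ i ≤ e.2.2.2.1 ∧ e.2.2.1 ≤ q.1 ∧ q.1 ≤ e.2.2.2.2 then t + e.1 else t) q.2
           > 0 then answer + 1 else answer) acc
      = acc + ∑ b ∈ Finset.range row.length,
          (if 0 < row.getD b 0 + effSum skill i (s + b) then (1 : Int) else 0) := by
  induction row with
  | nil => intro s acc; simp [PySem.List.enumerate_nil]
  | cons x xs ih =>
    intro s acc
    rw [PySem.List.enumerate_cons, List.foldl_cons, ih (s + 1), List.length_cons,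
      Finset.sum_range_succ']
    push_cast
    have hsum : ∑ b ∈ Finset.range xs.length,
        (if 0 < (x :: xs).getD (b + 1) 0 + effSum skill i (s + ((b : Int) + 1)) then (1 : Int) else 0)
        = ∑ b ∈ Finset.range xs.length,
          (if 0 < xs.getD b 0 + effSum skill i (s + 1 + (b : Int)) then (1 : Int) else 0) :=
      Finset.sum_congr rfl (fun b _ => by
        rw [List.getD_cons_succ, show s + ((b : Int) + 1) = s + 1 + b from by ring])
    rw [hsum, total_eq skill hsk i s x]
    simp only [List.getD_cons_zero, add_zero]
    split_ifs with h <;> ring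

theorem bouter (skill : List (List Int)) (hsk : ∀ s ∈ skill, s.length = 6) :
    ∀ (rows : List (List Int)) (s acc : Int),
      (PySem.List.enumerate rows s).foldl (fun answer p =>
        (PySem.List.enumerate p.2).foldl (fun answer q =>
          if (skill.map skillDelta).foldl (fun t e =>
              if e.2.1 ≤ p.1 ∧ p.1 ≤ e.2.2.2.1 ∧ e.2.2.1 ≤ q.1 ∧ q.1 ≤ e.2.2.2.2 then t + e.1 else t) q.2
             > 0 then answer + 1 else answer) answer) acc
      = acc + ∑ a ∈ Finset.range rows.length,
          ∑ b ∈ Finset.range ((rows.getD a []).length),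
            (if 0 < (rows.getD a []).getD b 0 + effSum skill (s + a) b then (1 : Int) else 0) := by
  intro rows
  induction rows with
  | nil => intro s acc; simp [PySem.List.enumerate_nil]
  | cons r rs ih =>
    intro s acc
    rw [PySem.List.enumerate_cons, List.foldl_cons]
    have hin : (PySem.List.enumerate r).foldl (fun answer q =>
        if (skill.map skillDelta).foldl (fun t e =>
            if e.2.1 ≤ s ∧ s ≤ e.2.2.2.1 ∧ e.2.2.1 ≤ q.1 ∧ q.1 ≤ e.2.2.2.2 then t + e.1 else t) q.2
           > 0 then answer + 1 else answer) acc
        = acc + ∑ b ∈ Finset.range r.length,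
            (if 0 < r.getD b 0 + effSum skill s b then (1 : Int) else 0) := by
      rw [brow skill hsk s r 0 acc]
      exact congrArg (acc + ·) (Finset.sum_congr rfl (fun b _ => by rw [zero_add]))
    rw [show ((s, r) : Int × List Int).1 = s from rfl, show ((s, r) : Int × List Int).2 = r from rfl] at *
    rw [hin, ih (s + 1), List.length_cons, Finset.sum_range_succ']
    have h0 : ∑ b ∈ Finset.range (((r :: rs).getD 0 []).length),
        (if 0 < ((r :: rs).getD 0 []).getD b 0 + effSum skill (s + (0 : Nat)) b then (1 : Int) else 0)
        = ∑ b ∈ Finset.range r.length, (if 0 < r.getD b 0 + effSum skill s b then (1 : Int) else 0) := by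
      simp
    have hrest : ∑ a ∈ Finset.range rs.length,
        ∑ b ∈ Finset.range (((r :: rs).getD (a + 1) []).length),
          (if 0 < ((r :: rs).getD (a + 1) []).getD b 0 + effSum skill (s + ((a : Nat) + 1 : Nat)) b then (1 : Int) else 0)
        = ∑ a ∈ Finset.range rs.length,
          ∑ b ∈ Finset.range ((rs.getD a []).length),
            (if 0 < (rs.getD a []).getD b 0 + effSum skill (s + 1 + a) b then (1 : Int) else 0) := by
      refine Finset.sum_congr rfl (fun a _ => ?_)
      rw [List.getD_cons_succ]
      refine Finset.sum_congr rfl (fun b _ => ?_)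
      rw [show s + ((a : Nat) + 1 : Nat) = s + 1 + (a : Nat) from by push_cast; ring]
    rw [h0, hrest]
    ring

theorem solution_alt_eq (board : List (List Int)) (skill : List (List Int))
    (hsk : ∀ s ∈ skill, s.length = 6) :
    solution_alt board skill
      = ∑ a ∈ Finset.range board.length,
          ∑ b ∈ Finset.range ((board.getD a []).length),
            (if 0 < mget board a b + effSum skill a b then (1 : Int) else 0) := by
  rw [solution_alt]
  rw [bouter skill hsk board 0 0]
  simp only [mget, zero_add]
  rfl

-- single point-mass summed over an initial segment
theorem point1 (J : Nat) (q y : Int) :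
    ∑ x ∈ Finset.range (J + 1), (if (x : Int) = q then y else 0)
      = if 0 ≤ q ∧ q ≤ (J : Int) then y else 0 := by
  by_cases h : 0 ≤ q ∧ q ≤ (J : Int)
  · have hcg : ∀ x ∈ Finset.range (J + 1), (if (x : Int) = q then y else 0)
        = (if x = q.toNat then y else 0) :=
      fun x hx => if_congr (by omega) rfl rfl
    rw [Finset.sum_congr rfl hcg, Finset.sum_ite_eq' (Finset.range (J + 1)) q.toNat (fun _ => y),
      if_pos (Finset.mem_range.mpr (by omega)), if_pos h]
  · rw [if_neg h]
    refine Finset.sum_eq_zero (fun x hx => ?_)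
    simp only [Finset.mem_range] at hx
    exact if_neg (fun hq => h ⟨by omega, by omega⟩)

theorem point2 (I J : Nat) (p q y : Int) :
    ∑ a ∈ Finset.range (I + 1), ∑ b ∈ Finset.range (J + 1),
        (if (a : Int) = p ∧ (b : Int) = q then y else 0)
      = if 0 ≤ p ∧ p ≤ (I : Int) ∧ 0 ≤ q ∧ q ≤ (J : Int) then y else 0 := by
  have h1 : ∀ a : Nat, ∑ b ∈ Finset.range (J + 1), (if (a : Int) = p ∧ (b : Int) = q then y else 0)
      = (if (a : Int) = p then (if 0 ≤ q ∧ q ≤ (J : Int) then y else 0) else 0) := by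
    intro a
    by_cases h : (a : Int) = p
    · simp only [h, true_and]
      exact point1 J q y
    · simp [h]
  rw [Finset.sum_congr rfl (fun a _ => h1 a), point1 I p _]
  by_cases hp : 0 ≤ p ∧ p ≤ (I : Int) <;> by_cases hq : 0 ≤ q ∧ q ≤ (J : Int) <;>
    simp [hp, hq]

theorem corner (A A' C C' : Prop) [Decidable A] [Decidable A'] [Decidable C] [Decidable C']
    (d : Int) (hA : A' → A) (hC : C' → C) :
    (if A ∧ C then d else 0) - (if A ∧ C' then d else 0) - (if A' ∧ C then d else 0)
      + (if A' ∧ C' then d else 0) = if A ∧ ¬A' ∧ C ∧ ¬C' then d else 0 := by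
  by_cases hA' : A' <;> by_cases hC' : C' <;> by_cases hA0 : A <;> by_cases hC0 : C <;>
    first
    | exact absurd (hA hA') hA0
    | exact absurd (hC hC') hC0
    | (simp [hA', hC', hA0, hC0])

theorem box {n m : Nat} {s : List Int} (h : SkOK n m s) {a b : Nat} :
    ∑ y ∈ Finset.range (a + 1), ∑ x ∈ Finset.range (b + 1), pts s y x = eff s a b := by
  obtain ⟨hlen, h1, h2, h3, h4, h5, h6⟩ := h
  rcases s with _ | ⟨t, _ | ⟨r1, _ | ⟨c1, _ | ⟨r2, _ | ⟨c2, _ | ⟨deg, rest⟩⟩⟩⟩⟩⟩ <;>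
    simp at hlen
  obtain rfl : rest = [] := by
    cases rest with
    | nil => rfl
    | cons x xs => simp at hlen
  simp only [List.getD_cons_succ, List.getD_cons_zero] at h1 h2 h3 h4 h5 h6
  simp only [pts, eff, List.getD_cons_succ, List.getD_cons_zero]
  simp only [Finset.sum_add_distrib, Finset.sum_sub_distrib]
  rw [point2 a b r1 c1, point2 a b r1 (c2 + 1), point2 a b (r2 + 1) c1, point2 a b (r2 + 1) (c2 + 1)]
  rw [if_congr (show (0 ≤ r1 ∧ r1 ≤ (a : Int) ∧ 0 ≤ c1 ∧ c1 ≤ (b : Int))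
        ↔ ((r1 ≤ (a : Int)) ∧ (c1 ≤ (b : Int))) by omega) rfl rfl,
      if_congr (show (0 ≤ r1 ∧ r1 ≤ (a : Int) ∧ 0 ≤ c2 + 1 ∧ c2 + 1 ≤ (b : Int))
        ↔ ((r1 ≤ (a : Int)) ∧ (c2 + 1 ≤ (b : Int))) by omega) rfl rfl,
      if_congr (show (0 ≤ r2 + 1 ∧ r2 + 1 ≤ (a : Int) ∧ 0 ≤ c1 ∧ c1 ≤ (b : Int))
        ↔ ((r2 + 1 ≤ (a : Int)) ∧ (c1 ≤ (b : Int))) by omega) rfl rfl,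
      if_congr (show (0 ≤ r2 + 1 ∧ r2 + 1 ≤ (a : Int) ∧ 0 ≤ c2 + 1 ∧ c2 + 1 ≤ (b : Int))
        ↔ ((r2 + 1 ≤ (a : Int)) ∧ (c2 + 1 ≤ (b : Int))) by omega) rfl rfl,
      if_congr (show (r1 ≤ (a : Int) ∧ (a : Int) ≤ r2 ∧ c1 ≤ (b : Int) ∧ (b : Int) ≤ c2)
        ↔ ((r1 ≤ (a : Int)) ∧ ¬(r2 + 1 ≤ (a : Int)) ∧ (c1 ≤ (b : Int)) ∧ ¬(c2 + 1 ≤ (b : Int)))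
        by omega) rfl rfl]
  exact corner _ _ _ _ _ (by omega) (by omega)

theorem list_sum_swap {α : Type} (l : List α) (F : Finset Nat) (g : Nat → α → Int) :
    ∑ y ∈ F, (l.map (g y)).sum = (l.map (fun s => ∑ y ∈ F, g y s)).sum := by
  induction l with
  | nil => simp
  | cons x xs ih => simp [Finset.sum_add_distrib, ih]

theorem eff_zero_right {n m : Nat} {s : List Int} (h : SkOK n m s) {j : Int} (hj : (m : Int) ≤ j)
    (i : Int) : eff s i j = 0 := by
  rw [eff, if_neg]
  intro hc
  have := h.2.2.2.2.2.2
  omega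

-- the heart: the finished difference array holds the per-cell skill sums
theorem chain {board skill : List (List Int)}
    (hsk : ∀ s ∈ skill, SkOK board.length (board.headD []).length s) {a b : Nat}
    (ha : a < board.length) (hb : b < (board.headD []).length) :
    mget (colPass board.length (board.headD []).length
      (rowPass board.length (board.headD []).length
        (skill.foldl applySkill
          (List.replicate (board.length + 1)
            (List.replicate ((board.headD []).length + 1) (0 : Int)))))) a b
      = effSum skill a b := by
  obtain ⟨S1, E1⟩ := fold1_mget skill _ (shape_replicate board.length (board.headD []).length) hsk
  obtain ⟨S2, E2⟩ := rowPass_mget S1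
  obtain ⟨S3, E3⟩ := colPass_mget S2
  rw [E3 a b, if_pos ⟨hb, by omega⟩]
  have step2 : ∀ x, x ∈ Finset.range (a + 1) →
      mget (rowPass board.length (board.headD []).length
        (skill.foldl applySkill (List.replicate (board.length + 1)
          (List.replicate ((board.headD []).length + 1) (0 : Int))))) x b
      = ∑ x2 ∈ Finset.range (b + 1), (skill.map (fun s => pts s x x2)).sum := by
    intro x hx
    rw [E2 x b, if_pos ⟨by simp at hx; omega, by omega⟩]
    refine Finset.sum_congr rfl (fun x2 _ => ?_)
    rw [E1 x x2, mget_replicate]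
    ring
  rw [Finset.sum_congr rfl step2]
  have swap1 : ∀ x, x ∈ Finset.range (a + 1) →
      ∑ x2 ∈ Finset.range (b + 1), (skill.map (fun s => pts s x x2)).sum
      = (skill.map (fun s => ∑ x2 ∈ Finset.range (b + 1), pts s x x2)).sum := by
    intro x _
    exact list_sum_swap skill (Finset.range (b + 1)) (fun x2 s => pts s x x2)
  rw [Finset.sum_congr rfl swap1,
    list_sum_swap skill (Finset.range (a + 1)) (fun y s => ∑ x2 ∈ Finset.range (b + 1), pts s y x2)]
  rw [effSum]
  congr 1
  refine List.map_congr_left (fun s hs => ?_)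
  exact box (hsk s hs)

theorem solution_eq_alt (board skill : List (List Int)) (hpre : Pre_solution board skill) :
    solution board skill = solution_alt board skill := by
  obtain ⟨hne, hrows, hskp⟩ := hpre
  have hsk : ∀ s ∈ skill, SkOK board.length (board.headD []).length s := fun s hs => hskp s hs
  have hrows' : ∀ i, i < board.length → (board.headD []).length ≤ (board.getD i []).length := by
    intro i hi
    refine hrows (board.getD i []) ?_
    rw [List.getD_eq_getElem?_getD, List.getElem?_eq_getElem hi]
    exact List.getElem_mem hi
  simp only [solution]
  obtain ⟨L, R, E⟩ := addPass_mget (D := colPass board.length (board.headD []).length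
      (rowPass board.length (board.headD []).length
        (skill.foldl applySkill (List.replicate (board.length + 1)
          (List.replicate ((board.headD []).length + 1) (0 : Int))))))
    (rfl : board.length = board.length) hrows'
  rw [countPos_eq, L, solution_alt_eq board skill (fun s hs => (hskp s hs).1)]
  refine Finset.sum_congr rfl (fun a ha => ?_)
  rw [R a]
  refine Finset.sum_congr rfl (fun b hb => ?_)
  simp only [Finset.mem_range] at ha hb
  rw [E a b]
  by_cases hbm : b < (board.headD []).length
  · rw [if_pos (show a < board.length ∧ b < (board.headD []).length from ⟨ha, hbm⟩),
      chain hsk ha hbm]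
  · rw [if_neg (show ¬(a < board.length ∧ b < (board.headD []).length) from fun h => hbm h.2)]
    have : effSum skill a b = 0 := by
      rw [effSum]
      refine List.sum_eq_zero (fun x hx => ?_)
      obtain ⟨s, hs, rfl⟩ := List.mem_map.mp hx
      exact eff_zero_right (hsk s hs) (by omega) _
    rw [this]

-- ===== VERDICT (by name: the statement is the Claim_ definition above) =====
theorem solution_spec : Claim_equal_solution := by
  intro board skill _ hpre
  unfold Spec_solution
  exact solution_eq_alt board skill hpre
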